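-- pv_equiv track=rewrite | github.com/edirab/AnalyzeMyBudget | analyze.py | num_of_incomes_less_then
-- ===== SOURCE A (Python) =====
-- def num_of_incomes_less_then(incomes_list):
--
--     from_0_to_10 = 0
--     from_10_to_20 = 0
--     from_20_to_30 = 0
--     greater_30 = 0
--
--     for i in incomes_list:
--         s = i['summ']
--         if 0 < s < 10000:
--             from_0_to_10 += 1
--         elif 10000 <= s < 20000:
--             from_10_to_20 += 1
--         elif 20000 <= s <= 30000:
--             from_20_to_30 += 1
--         else:
--             greater_30 += 1
--     return from_0_to_10, from_10_to_20, from_20_to_30, greater_30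
-- ===== SOURCE B (Python) =====
-- def num_of_incomes_less_then(incomes_list):
--     from_0_to_10 = sum(1 for i in incomes_list if 0 < i['summ'] < 10000)
--     from_10_to_20 = sum(1 for i in incomes_list if 10000 <= i['summ'] < 20000)
--     from_20_to_30 = sum(1 for i in incomes_list if 20000 <= i['summ'] <= 30000)
--     greater_30 = len(incomes_list) - from_0_to_10 - from_10_to_20 - from_20_to_30
--     return from_0_to_10, from_10_to_20, from_20_to_30, greater_30
-- ===== Notes on version B (the rewrite author's own statement) =====
-- stated objective: simpler
-- what changed: Replaces the four-accumulator if/elif loop by three independent one-condition counts over the list, with the catch-all fourth bucket derived arithmetically as the total length minus the other three.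
import Mathlib
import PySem

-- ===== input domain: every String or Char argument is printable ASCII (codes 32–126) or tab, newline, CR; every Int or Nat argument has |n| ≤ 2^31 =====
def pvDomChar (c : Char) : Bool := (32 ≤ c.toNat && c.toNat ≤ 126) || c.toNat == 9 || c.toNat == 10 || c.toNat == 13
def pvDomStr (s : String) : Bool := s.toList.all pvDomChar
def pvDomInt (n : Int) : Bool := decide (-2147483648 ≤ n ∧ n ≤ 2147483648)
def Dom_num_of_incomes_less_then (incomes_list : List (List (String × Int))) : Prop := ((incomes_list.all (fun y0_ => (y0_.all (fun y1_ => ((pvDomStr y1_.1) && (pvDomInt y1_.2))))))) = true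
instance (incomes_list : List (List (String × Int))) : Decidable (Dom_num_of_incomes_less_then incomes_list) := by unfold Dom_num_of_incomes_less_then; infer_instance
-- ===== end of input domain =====

-- B replaces A's four-accumulator if/elif loop by three independent one-condition counts,
-- deriving the catch-all fourth bucket as total length minus the other three (objective: simpler).


-- ===== PORT A =====
-- i['summ'] (both Pythons): dict lookup; total form with default 0, used only under
-- Pre_ (key present), where it is exact.
def getSumm (i : List (String × Int)) : Int :=
  ((PySem.Dict.mk i).get? "summ").getD 0

def num_of_incomes_less_then (incomes_list : List (List (String × Int))) : Int × Int × Int × Int :=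
  incomes_list.foldl
    (fun acc i =>
      let s := getSumm i
      if 0 < s ∧ s < 10000 then (acc.1 + 1, acc.2.1, acc.2.2.1, acc.2.2.2)
      else if 10000 ≤ s ∧ s < 20000 then (acc.1, acc.2.1 + 1, acc.2.2.1, acc.2.2.2)
      else if 20000 ≤ s ∧ s ≤ 30000 then (acc.1, acc.2.1, acc.2.2.1 + 1, acc.2.2.2)
      else (acc.1, acc.2.1, acc.2.2.1, acc.2.2.2 + 1))
    (0, 0, 0, 0)

-- ===== PORT B =====
def num_of_incomes_less_then_alt (incomes_list : List (List (String × Int))) : Int × Int × Int × Int :=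
  let c1 : Int := incomes_list.countP (fun i => decide (0 < getSumm i ∧ getSumm i < 10000))
  let c2 : Int := incomes_list.countP (fun i => decide (10000 ≤ getSumm i ∧ getSumm i < 20000))
  let c3 : Int := incomes_list.countP (fun i => decide (20000 ≤ getSumm i ∧ getSumm i ≤ 30000))
  (c1, c2, c3, (incomes_list.length : Int) - c1 - c2 - c3)

-- ===== PRECONDITION & SPEC =====
-- Pre_ excludes exactly the inputs where the Python A raises KeyError: some entry lacks the key 'summ'.
def Pre_num_of_incomes_less_then (incomes_list : List (List (String × Int))) : Prop :=
  (incomes_list.all (fun i => i.any (fun p => p.1 == "summ"))) = true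
instance (incomes_list : List (List (String × Int))) : Decidable (Pre_num_of_incomes_less_then incomes_list) := by unfold Pre_num_of_incomes_less_then; infer_instance

def pvWitness_num_of_incomes_less_then : (List (List (String × Int))) :=
  [[("summ", 5000)], [("summ", 15000)], [("summ", 30000)], [("summ", -3)]]

def Spec_num_of_incomes_less_then (incomes_list : List (List (String × Int))) (out : Int × Int × Int × Int) : Prop := out = num_of_incomes_less_then_alt incomes_list
instance (incomes_list : List (List (String × Int))) (out : Int × Int × Int × Int) : Decidable (Spec_num_of_incomes_less_then incomes_list out) := by unfold Spec_num_of_incomes_less_then; infer_instance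

-- ===== CLAIM (what is proved, stated in full; the proofs are below) =====
def Claim_equal_num_of_incomes_less_then : Prop := ∀ (incomes_list : List (List (String × Int))), Dom_num_of_incomes_less_then incomes_list → Pre_num_of_incomes_less_then incomes_list → Spec_num_of_incomes_less_then incomes_list (num_of_incomes_less_then incomes_list)

-- ===== LEMMAS AND PROOFS =====
-- Loop invariant: A's fold adds, component-wise, the three branch counts and the
-- catch-all count (length minus the others) to any starting accumulator.
theorem foldA_eq (xs : List (List (String × Int))) (a b c g : Int) :
    xs.foldl
      (fun acc i =>
        let s := getSumm i
        if 0 < s ∧ s < 10000 then (acc.1 + 1, acc.2.1, acc.2.2.1, acc.2.2.2)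
        else if 10000 ≤ s ∧ s < 20000 then (acc.1, acc.2.1 + 1, acc.2.2.1, acc.2.2.2)
        else if 20000 ≤ s ∧ s ≤ 30000 then (acc.1, acc.2.1, acc.2.2.1 + 1, acc.2.2.2)
        else (acc.1, acc.2.1, acc.2.2.1, acc.2.2.2 + 1))
      (a, b, c, g) =
    (a + xs.countP (fun i => decide (0 < getSumm i ∧ getSumm i < 10000)),
     b + xs.countP (fun i => decide (10000 ≤ getSumm i ∧ getSumm i < 20000)),
     c + xs.countP (fun i => decide (20000 ≤ getSumm i ∧ getSumm i ≤ 30000)),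
     g + ((xs.length : Int)
        - xs.countP (fun i => decide (0 < getSumm i ∧ getSumm i < 10000))
        - xs.countP (fun i => decide (10000 ≤ getSumm i ∧ getSumm i < 20000))
        - xs.countP (fun i => decide (20000 ≤ getSumm i ∧ getSumm i ≤ 30000)))) := by
  induction xs generalizing a b c g with
  | nil => simp
  | cons d xs ih =>
    simp only [List.foldl_cons, List.countP_cons, List.length_cons]
    by_cases h1 : 0 < getSumm d ∧ getSumm d < 10000 <;>
      by_cases h2 : 10000 ≤ getSumm d ∧ getSumm d < 20000 <;>
      by_cases h3 : 20000 ≤ getSumm d ∧ getSumm d ≤ 30000 <;>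
      simp [h1, h2, h3, ih, Prod.ext_iff] <;> omega

-- ===== VERDICT (by name: the statement is the Claim_ definition above) =====
theorem num_of_incomes_less_then_spec : Claim_equal_num_of_incomes_less_then := by
  intro xs _ _
  unfold Spec_num_of_incomes_less_then num_of_incomes_less_then num_of_incomes_less_then_alt
  rw [foldA_eq]
  simp
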